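-- pv_equiv track=rewrite | github.com/Phucptit2003/Python-PTIT | Min-tripl.py | find_min_triplet_sum
-- ===== SOURCE A (Python) =====
-- def find_min_triplet_sum(arr):
--     tmp=[]
--     tmp.append(arr[0])
--     tmp.append(arr[1])
--     tmp.append(arr[2])
--     for i in range(3,len(arr)):
--         t=max(tmp)
--         if sum(tmp)-t+arr[i]<sum(tmp):
--             tmp.remove(t)
--             tmp.append(arr[i])
--
--     return sum(tmp)
-- ===== SOURCE B (Python) =====
-- def find_min_triplet_sum(arr):
--     s = sorted(arr)
--     return s[0] + s[1] + s[2]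
-- ===== Notes on version B (the rewrite author's own statement) =====
-- stated objective: idiomatic
-- what changed: Replaces A's running 3-element buffer with replace-the-max updates by a single sort followed by summing the three smallest elements; like A, B raises IndexError when the list has fewer than 3 elements (Pre_ excludes exactly those crashing inputs).
import Mathlib
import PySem

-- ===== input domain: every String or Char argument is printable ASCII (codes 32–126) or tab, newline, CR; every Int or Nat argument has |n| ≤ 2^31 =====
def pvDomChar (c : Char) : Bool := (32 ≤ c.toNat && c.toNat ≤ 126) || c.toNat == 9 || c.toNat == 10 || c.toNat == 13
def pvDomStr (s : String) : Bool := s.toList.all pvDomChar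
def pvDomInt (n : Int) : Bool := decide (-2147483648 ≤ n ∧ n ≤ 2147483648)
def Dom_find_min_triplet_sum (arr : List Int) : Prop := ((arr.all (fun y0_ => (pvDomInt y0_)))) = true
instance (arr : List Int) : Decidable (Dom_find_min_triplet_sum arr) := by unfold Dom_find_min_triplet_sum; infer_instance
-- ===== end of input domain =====

-- B sorts once and sums the three smallest elements instead of A's running 3-element
-- buffer with replace-the-max updates; equal return values on lists of length ≥ 3.

-- ===== PORT A =====
-- one iteration of A's for-loop body: t = max(tmp); if sum-t+x < sum: tmp.remove(t); tmp.append(x)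
def pvAStep (tmp : List Int) (x : Int) : List Int :=
  let t := (PySem.List.max? tmp (fun y => y)).getD 0
  if tmp.sum - t + x < tmp.sum then ((PySem.List.remove? tmp t).getD tmp) ++ [x] else tmp

def find_min_triplet_sum (arr : List Int) : Int :=
  let tmp : List Int :=
    [PySem.List.pyGetD arr 0 0, PySem.List.pyGetD arr 1 0, PySem.List.pyGetD arr 2 0]
  ((PySem.List.pyRange 3 arr.length 1).foldl
      (fun tmp i => pvAStep tmp (PySem.List.pyGetD arr i 0)) tmp).sum

-- ===== PORT B =====
def find_min_triplet_sum_alt (arr : List Int) : Int :=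
  let s := PySem.List.sorted arr (fun y => y) false
  PySem.List.pyGetD s 0 0 + PySem.List.pyGetD s 1 0 + PySem.List.pyGetD s 2 0

-- ===== PRECONDITION & SPEC =====
-- A (and B alike) raises IndexError on lists with fewer than 3 elements; exactly those are excluded.
def Pre_find_min_triplet_sum (arr : List Int) : Prop := 3 ≤ arr.length
instance (arr : List Int) : Decidable (Pre_find_min_triplet_sum arr) := by
  unfold Pre_find_min_triplet_sum; infer_instance

def pvWitness_find_min_triplet_sum : List Int := [5, -1, 7, 2]

def Spec_find_min_triplet_sum (arr : List Int) (out : Int) : Prop := out = find_min_triplet_sum_alt arr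
instance (arr : List Int) (out : Int) : Decidable (Spec_find_min_triplet_sum arr out) := by unfold Spec_find_min_triplet_sum; infer_instance

-- ===== CLAIM (what is proved, stated in full; the proofs are below) =====
def Claim_equal_find_min_triplet_sum : Prop := ∀ (arr : List Int), Dom_find_min_triplet_sum arr → Pre_find_min_triplet_sum arr → Spec_find_min_triplet_sum arr (find_min_triplet_sum arr)

-- ===== LEMMAS AND PROOFS =====

-- the three smallest elements of l (with multiplicity), as B computes them
def pvBot3 (l : List Int) : List Int := (PySem.List.sorted l (fun y => y) false).take 3

lemma pvSorted_append_singleton (l : List Int) (x : Int) :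
    PySem.List.sorted (l ++ [x]) (fun y => y) false =
      List.orderedInsert (· ≤ ·) x (PySem.List.sorted l (fun y => y) false) := by
  apply PySem.List.sorted_id_eq_of_perm_of_pairwise
  · exact ((List.perm_orderedInsert _ _ _).trans
      ((PySem.List.sorted_perm l (fun y => y) false).cons x)).trans
      (List.perm_append_singleton x l).symm
  · exact List.Pairwise.orderedInsert _ _ (PySem.List.sorted_pairwise l (fun y => y))

lemma pvErase3 (s0 s1 s2 : Int) (h01 : s0 ≤ s1) (h12 : s1 ≤ s2) :
    ([s0, s1, s2].erase s2).Perm [s0, s1] := by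
  by_cases h0 : s0 = s2
  · have e1 : s1 = s2 := le_antisymm h12 (h0 ▸ h01)
    subst h0; subst e1; simp
  · by_cases h1 : s1 = s2
    · subst h1; simp [h0]
    · simp [h0, h1]

lemma pvStep_perm (pref tmp : List Int) (x : Int) (h3 : 3 ≤ pref.length)
    (hp : tmp.Perm (pvBot3 pref)) :
    (pvAStep tmp x).Perm (pvBot3 (pref ++ [x])) := by
  set s := PySem.List.sorted pref (fun y => y) false with hs
  have hlen : 3 ≤ s.length := by
    rw [hs, (PySem.List.sorted_perm pref (fun y => y) false).length_eq]; exact h3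
  obtain ⟨s0, s1, s2, rest, hsplit⟩ :
      ∃ s0 s1 s2 rest, s = s0 :: s1 :: s2 :: rest := by
    match s, hlen with
    | a :: b :: c :: r, _ => exact ⟨a, b, c, r, rfl⟩
  have hpw := PySem.List.sorted_pairwise pref (fun y => y)
  rw [← hs, hsplit] at hpw
  simp only [List.pairwise_cons] at hpw
  have h01 : s0 ≤ s1 := hpw.1 s1 (by simp)
  have h12 : s1 ≤ s2 := hpw.2.1 s2 (by simp)
  have htake : pvBot3 pref = [s0, s1, s2] := by
    rw [pvBot3, ← hs, hsplit]; rfl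
  rw [htake] at hp
  -- the max of tmp is s2
  have htne : tmp ≠ [] := by
    intro h; rw [h] at hp; exact (by simp : ¬([] : List Int).Perm [s0, s1, s2]) hp
  obtain ⟨m, hm⟩ : ∃ m, PySem.List.max? tmp (fun y => y) = some m := by
    cases h : PySem.List.max? tmp (fun y => y) with
    | none => exact absurd ((PySem.List.max?_eq_none_iff tmp (fun y => y)).mp h) htne
    | some m => exact ⟨m, rfl⟩
  have hmmem : m ∈ tmp := PySem.List.max?_mem hm
  have hmax : ∀ y ∈ tmp, y ≤ m := PySem.List.max?_isMax hm
  have hm2 : m = s2 := by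
    have h1 : s2 ≤ m := hmax s2 (hp.mem_iff.mpr (by simp))
    have h2 : m ≤ s2 := by
      have := hp.mem_iff.mp hmmem
      simp only [List.mem_cons, List.not_mem_nil, or_false] at this
      rcases this with h | h | h <;> omega
    exact le_antisymm h2 h1
  -- compute the new bottom-3
  have hins : pvBot3 (pref ++ [x]) =
      (List.orderedInsert (· ≤ ·) x (s0 :: s1 :: s2 :: rest)).take 3 := by
    rw [pvBot3, pvSorted_append_singleton, ← hs, hsplit]
  unfold pvAStep
  rw [hm]
  simp only [Option.getD_some]
  by_cases hcond : tmp.sum - m + x < tmp.sum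
  · rw [if_pos hcond]
    have hx : x < s2 := by omega
    have hrem : PySem.List.remove? tmp m = some (tmp.erase m) :=
      PySem.List.remove?_eq_some_erase tmp m hmmem
    rw [hrem, Option.getD_some, hm2]
    have herase : (tmp.erase s2).Perm [s0, s1] :=
      (hp.erase s2).trans (pvErase3 s0 s1 s2 h01 h12)
    have happ : (tmp.erase s2 ++ [x]).Perm [s0, s1, x] := by
      simpa using herase.append (List.Perm.refl [x])
    rw [hins]
    by_cases c0 : x ≤ s0
    · rw [List.orderedInsert, if_pos c0]
      simp only [List.take]
      exact happ.trans (List.perm_append_singleton x [s0, s1])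
    · by_cases c1 : x ≤ s1
      · rw [List.orderedInsert, if_neg c0, List.orderedInsert, if_pos c1]
        simp only [List.take]
        exact happ.trans ((List.Perm.swap x s1 []).cons s0)
      · by_cases c2 : x ≤ s2
        · rw [List.orderedInsert, if_neg c0, List.orderedInsert, if_neg c1,
            List.orderedInsert, if_pos c2]
          simp only [List.take]
          exact happ
        · omega
  · rw [if_neg hcond]
    have hx : s2 ≤ x := by omega
    rw [hins]
    by_cases c0 : x ≤ s0
    · have e0 : s0 = s2 := le_antisymm (h01.trans h12) (hx.trans c0)
      have e1 : s1 = s2 := le_antisymm h12 (by omega)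
      have ex : x = s2 := le_antisymm (by omega) hx
      rw [List.orderedInsert, if_pos c0]
      simp only [List.take]
      rw [ex, e0, e1]
      rw [e0, e1] at hp
      exact hp
    · by_cases c1 : x ≤ s1
      · have e1 : s1 = s2 := le_antisymm h12 (hx.trans c1)
        have ex : x = s2 := le_antisymm (by omega) hx
        rw [List.orderedInsert, if_neg c0, List.orderedInsert, if_pos c1]
        simp only [List.take]
        rw [ex, e1]
        rw [e1] at hp
        exact hp
      · by_cases c2 : x ≤ s2
        · have ex : x = s2 := le_antisymm c2 hx
          rw [List.orderedInsert, if_neg c0, List.orderedInsert, if_neg c1,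
            List.orderedInsert, if_pos c2]
          simp only [List.take]
          rw [ex]; exact hp
        · rw [List.orderedInsert, if_neg c0, List.orderedInsert, if_neg c1,
            List.orderedInsert, if_neg c2]
          simp only [List.take]
          exact hp

lemma pvLoop_perm (rest : List Int) : ∀ (pref tmp : List Int), 3 ≤ pref.length →
    tmp.Perm (pvBot3 pref) →
    (rest.foldl pvAStep tmp).Perm (pvBot3 (pref ++ rest)) := by
  induction rest with
  | nil => intro pref tmp h3 hp; simpa using hp
  | cons x r ih =>
    intro pref tmp h3 hp
    have : pref ++ x :: r = (pref ++ [x]) ++ r := by simp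
    rw [this, List.foldl_cons]
    exact ih (pref ++ [x]) (pvAStep tmp x) (by simp; omega) (pvStep_perm pref tmp x h3 hp)

-- ===== VERDICT (by name: the statement is the Claim_ definition above) =====
theorem find_min_triplet_sum_spec : Claim_equal_find_min_triplet_sum := by
  intro arr _ hpre
  unfold Pre_find_min_triplet_sum at hpre
  unfold Spec_find_min_triplet_sum find_min_triplet_sum find_min_triplet_sum_alt
  -- set up the three initial elements
  obtain ⟨a0, a1, a2, t, hsplit⟩ :
      ∃ a0 a1 a2 t, arr = a0 :: a1 :: a2 :: t := by
    match arr, hpre with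
    | x :: y :: z :: r, _ => exact ⟨x, y, z, r, rfl⟩
  have hget0 : PySem.List.pyGetD arr 0 0 = a0 := by rw [hsplit]; simp [pysem]
  have hget1 : PySem.List.pyGetD arr 1 0 = a1 := by rw [hsplit]; simp [pysem]
  have hget2 : PySem.List.pyGetD arr 2 0 = a2 := by rw [hsplit]; simp [pysem]
  rw [hget0, hget1, hget2]
  -- A's loop over indices 3..len is a fold over arr.drop 3
  dsimp only []
  rw [PySem.List.foldl_pyRange_pyGetD' arr 0 pvAStep _ (by norm_num)]
  have hdrop : arr.drop ((3 : Int)).toNat = t := by rw [hsplit]; rfl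
  rw [hdrop]
  -- the invariant at the end: result ~ bottom-3 of arr
  have hinit : ([a0, a1, a2] : List Int).Perm (pvBot3 (arr.take 3)) := by
    have htk : arr.take 3 = [a0, a1, a2] := by rw [hsplit]; rfl
    rw [htk, pvBot3]
    have hlen : (PySem.List.sorted [a0, a1, a2] (fun y => y) false).length = 3 :=
      (PySem.List.sorted_perm [a0, a1, a2] (fun y => y) false).length_eq
    rw [List.take_of_length_le (by omega)]
    exact (PySem.List.sorted_perm [a0, a1, a2] (fun y => y) false).symm
  have hfin := pvLoop_perm t (arr.take 3) [a0, a1, a2] (by rw [hsplit]; rfl) hinit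
  have harr : arr.take 3 ++ t = arr := by rw [hsplit]; rfl
  rw [harr] at hfin
  rw [hfin.sum_eq]
  -- B's side: sum of the first three of sorted arr
  set s := PySem.List.sorted arr (fun y => y) false with hs
  have hslen : 3 ≤ s.length := by
    rw [hs, (PySem.List.sorted_perm arr (fun y => y) false).length_eq, hsplit]
    simp
  obtain ⟨s0, s1, s2, r, hss⟩ : ∃ s0 s1 s2 r, s = s0 :: s1 :: s2 :: r := by
    match s, hslen with
    | x :: y :: z :: w, _ => exact ⟨x, y, z, w, rfl⟩
  rw [pvBot3, ← hs, hss]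
  simp [pysem]
  ring
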